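-- pv_equiv track=rewrite | github.com/pranjalnaman/FPLAssist | fpldatascraper.py | get_past_seasons
-- ===== SOURCE A (Python) =====
-- def get_past_seasons(pid, data, psc):
--     """
--     Return stats from previous seasons if player is a veteran.
--
--     :param pid: Int - Player ID#
--     :param data: Dictionary - JSON
--     :param psc: Int - Past Season Count
--     :return: Dictionary - JSON
--     """
--
--     # Variable declarations for summed past statistic headers
--     total_points, minutes, goals_scored, assists, clean_sheets = 0, 0, 0, 0, 0
--     goals_conceded, own_goals, penalties_saved, penalties_missed = 0, 0, 0, 0
--     yellow_cards, red_cards, saves, ea_index = 0, 0, 0, 0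
--
--     # For all previous PL seasons...
--     for s in range(psc):
--         total_points += data['history_past'][s]['total_points']
--         minutes += data['history_past'][s]['minutes']
--         goals_scored += data['history_past'][s]['goals_scored']
--         assists += data['history_past'][s]['assists']
--         clean_sheets += data['history_past'][s]['clean_sheets']
--         goals_conceded += data['history_past'][s]['goals_conceded']
--         own_goals += data['history_past'][s]['own_goals']
--         penalties_saved += data['history_past'][s]['penalties_saved']
--         penalties_missed += data['history_past'][s]['penalties_missed']
--         yellow_cards += data['history_past'][s]['yellow_cards']
--         red_cards += data['history_past'][s]['red_cards']
--         saves += data['history_past'][s]['saves']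
--         ea_index += data['history_past'][s]['ea_index']
--
--     # Create JSON of overall past season stats
--     past_season_data = {
--         'total_points': total_points,
--         'mins_played': minutes,
--         'goals_scored': goals_scored,
--         'assists': assists,
--         'clean_sheets': clean_sheets,
--         'goals_conceded': goals_conceded,
--         'own_goals': own_goals,
--         'penalties_saved': penalties_saved,
--         'penalties_missed': penalties_missed,
--         'yellow_cards': yellow_cards,
--         'red_cards': red_cards,
--         'saves': saves,
--         'ea_index': ea_index,
--         'previous_pl_seasons': psc,
--         'Player_pid': pid
--     }
--
--     return past_season_data
-- ===== SOURCE B (Python) =====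
-- def get_past_seasons(pid, data, psc):
--     # Table-driven: per-stat sums via generator expressions over the seasons,
--     # instead of one loop mutating 13 named scalars.
--     fields = [
--         ('total_points', 'total_points'), ('minutes', 'mins_played'),
--         ('goals_scored', 'goals_scored'), ('assists', 'assists'),
--         ('clean_sheets', 'clean_sheets'), ('goals_conceded', 'goals_conceded'),
--         ('own_goals', 'own_goals'), ('penalties_saved', 'penalties_saved'),
--         ('penalties_missed', 'penalties_missed'), ('yellow_cards', 'yellow_cards'),
--         ('red_cards', 'red_cards'), ('saves', 'saves'), ('ea_index', 'ea_index'),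
--     ]
--     out = {dst: sum(data['history_past'][s][src] for s in range(psc))
--            for src, dst in fields}
--     out['previous_pl_seasons'] = psc
--     out['Player_pid'] = pid
--     return out
-- ===== Notes on version B (the rewrite author's own statement) =====
-- stated objective: simpler
-- what changed: Replaces the loop mutating 13 named scalar accumulators by a (source key, output key) table with one per-stat sum() each, assembling the result by a dict comprehension.
import Mathlib
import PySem

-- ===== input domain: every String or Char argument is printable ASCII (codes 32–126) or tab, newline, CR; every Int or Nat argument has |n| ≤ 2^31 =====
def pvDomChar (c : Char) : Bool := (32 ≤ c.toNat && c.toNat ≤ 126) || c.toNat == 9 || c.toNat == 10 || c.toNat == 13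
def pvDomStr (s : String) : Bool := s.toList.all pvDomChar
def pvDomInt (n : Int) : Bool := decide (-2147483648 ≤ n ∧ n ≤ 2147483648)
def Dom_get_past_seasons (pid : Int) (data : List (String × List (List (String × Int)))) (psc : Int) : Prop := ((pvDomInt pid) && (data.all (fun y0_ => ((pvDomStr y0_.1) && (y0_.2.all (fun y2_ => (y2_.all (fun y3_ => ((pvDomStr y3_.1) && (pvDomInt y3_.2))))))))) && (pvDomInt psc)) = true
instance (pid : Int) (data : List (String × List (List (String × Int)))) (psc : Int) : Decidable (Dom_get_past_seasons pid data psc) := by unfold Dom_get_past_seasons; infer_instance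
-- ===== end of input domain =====

-- B replaces A's single loop over 13 named scalar accumulators by a table of
-- (source key, output key) pairs with one per-stat sum each (objective: simpler).
-- A raises KeyError/IndexError on missing 'history_past', short history or missing
-- stat keys; Pre_ excludes exactly those inputs.

-- shared access primitive: data['history_past'][s][k], total via defaults
-- (Pre_ guarantees every access hits; exact there)
def pvField (data : List (String × List (List (String × Int)))) (s : Int) (k : String) : Int :=
  ((((PySem.List.pyGet? ((data.lookup "history_past").getD []) s).getD []).lookup k).getD 0)

-- ===== PORT A =====
def get_past_seasons (pid : Int) (data : List (String × List (List (String × Int)))) (psc : Int) : List (String × Int) :=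
  let r := (PySem.List.pyRange 0 psc 1).foldl
    (fun a s => (a.1 + pvField data s "total_points", a.2.1 + pvField data s "minutes", a.2.2.1 + pvField data s "goals_scored", a.2.2.2.1 + pvField data s "assists", a.2.2.2.2.1 + pvField data s "clean_sheets", a.2.2.2.2.2.1 + pvField data s "goals_conceded", a.2.2.2.2.2.2.1 + pvField data s "own_goals", a.2.2.2.2.2.2.2.1 + pvField data s "penalties_saved", a.2.2.2.2.2.2.2.2.1 + pvField data s "penalties_missed", a.2.2.2.2.2.2.2.2.2.1 + pvField data s "yellow_cards", a.2.2.2.2.2.2.2.2.2.2.1 + pvField data s "red_cards", a.2.2.2.2.2.2.2.2.2.2.2.1 + pvField data s "saves", a.2.2.2.2.2.2.2.2.2.2.2.2 + pvField data s "ea_index"))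
    ((0, 0, 0, 0, 0, 0, 0, 0, 0, 0, 0, 0, 0) : Int × Int × Int × Int × Int × Int × Int × Int × Int × Int × Int × Int × Int)
  [("total_points", r.1), ("mins_played", r.2.1), ("goals_scored", r.2.2.1), ("assists", r.2.2.2.1), ("clean_sheets", r.2.2.2.2.1), ("goals_conceded", r.2.2.2.2.2.1), ("own_goals", r.2.2.2.2.2.2.1), ("penalties_saved", r.2.2.2.2.2.2.2.1), ("penalties_missed", r.2.2.2.2.2.2.2.2.1), ("yellow_cards", r.2.2.2.2.2.2.2.2.2.1), ("red_cards", r.2.2.2.2.2.2.2.2.2.2.1), ("saves", r.2.2.2.2.2.2.2.2.2.2.2.1), ("ea_index", r.2.2.2.2.2.2.2.2.2.2.2.2),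
   ("previous_pl_seasons", psc), ("Player_pid", pid)]

-- ===== PORT B =====
def pvFields : List (String × String) :=
  [("total_points", "total_points"), ("minutes", "mins_played"), ("goals_scored", "goals_scored"), ("assists", "assists"), ("clean_sheets", "clean_sheets"), ("goals_conceded", "goals_conceded"), ("own_goals", "own_goals"), ("penalties_saved", "penalties_saved"), ("penalties_missed", "penalties_missed"), ("yellow_cards", "yellow_cards"), ("red_cards", "red_cards"), ("saves", "saves"), ("ea_index", "ea_index")]

def pvSumKey (data : List (String × List (List (String × Int)))) (psc : Int) (k : String) : Int :=
  ((PySem.List.pyRange 0 psc 1).map (fun s => pvField data s k)).sum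

def get_past_seasons_alt (pid : Int) (data : List (String × List (List (String × Int)))) (psc : Int) : List (String × Int) :=
  pvFields.map (fun f => (f.2, pvSumKey data psc f.1))
    ++ [("previous_pl_seasons", psc), ("Player_pid", pid)]

-- ===== PRECONDITION & SPEC =====
-- Pre_ excludes exactly the inputs where A raises: psc > 0 with no 'history_past'
-- key, fewer than psc seasons, or a season missing one of the 13 stat keys.
def Pre_get_past_seasons (pid : Int) (data : List (String × List (List (String × Int)))) (psc : Int) : Prop :=
  psc ≤ 0 ∨
    ((data.lookup "history_past").isSome = true ∧
     psc ≤ (((data.lookup "history_past").getD []).length : Int) ∧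
     ∀ season ∈ ((data.lookup "history_past").getD []).take psc.toNat,
       ∀ k ∈ (["total_points", "minutes", "goals_scored", "assists", "clean_sheets", "goals_conceded", "own_goals", "penalties_saved", "penalties_missed", "yellow_cards", "red_cards", "saves", "ea_index"] : List String),
         (season.lookup k).isSome = true)

instance (pid : Int) (data : List (String × List (List (String × Int)))) (psc : Int) : Decidable (Pre_get_past_seasons pid data psc) := by unfold Pre_get_past_seasons; infer_instance

def pvWitness_get_past_seasons : Int × (List (String × List (List (String × Int)))) × Int :=
  (7, [("history_past", [[("total_points", 1), ("minutes", 2), ("goals_scored", 3), ("assists", 4), ("clean_sheets", 5), ("goals_conceded", 6), ("own_goals", 7), ("penalties_saved", 8), ("penalties_missed", 9), ("yellow_cards", 10), ("red_cards", 11), ("saves", 12), ("ea_index", 13)]])], 1)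

def Spec_get_past_seasons (pid : Int) (data : List (String × List (List (String × Int)))) (psc : Int) (out : List (String × Int)) : Prop := out = get_past_seasons_alt pid data psc
instance (pid : Int) (data : List (String × List (List (String × Int)))) (psc : Int) (out : List (String × Int)) : Decidable (Spec_get_past_seasons pid data psc out) := by unfold Spec_get_past_seasons; infer_instance

-- ===== CLAIM (what is proved, stated in full; the proofs are below) =====
def Claim_equal_get_past_seasons : Prop := ∀ (pid : Int) (data : List (String × List (List (String × Int)))) (psc : Int), Dom_get_past_seasons pid data psc → Pre_get_past_seasons pid data psc → Spec_get_past_seasons pid data psc (get_past_seasons pid data psc)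

-- ===== LEMMAS AND PROOFS =====
-- A's single fold over a 13-tuple of accumulators equals the 13 per-component sums.
theorem pvFoldA (g1 g2 g3 g4 g5 g6 g7 g8 g9 g10 g11 g12 g13 : Int → Int) (l : List Int)
    (t : Int × Int × Int × Int × Int × Int × Int × Int × Int × Int × Int × Int × Int) :
    l.foldl (fun a s => (a.1 + g1 s, a.2.1 + g2 s, a.2.2.1 + g3 s, a.2.2.2.1 + g4 s, a.2.2.2.2.1 + g5 s, a.2.2.2.2.2.1 + g6 s, a.2.2.2.2.2.2.1 + g7 s, a.2.2.2.2.2.2.2.1 + g8 s, a.2.2.2.2.2.2.2.2.1 + g9 s, a.2.2.2.2.2.2.2.2.2.1 + g10 s, a.2.2.2.2.2.2.2.2.2.2.1 + g11 s, a.2.2.2.2.2.2.2.2.2.2.2.1 + g12 s, a.2.2.2.2.2.2.2.2.2.2.2.2 + g13 s)) t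
      = (t.1 + (l.map g1).sum, t.2.1 + (l.map g2).sum, t.2.2.1 + (l.map g3).sum, t.2.2.2.1 + (l.map g4).sum, t.2.2.2.2.1 + (l.map g5).sum, t.2.2.2.2.2.1 + (l.map g6).sum, t.2.2.2.2.2.2.1 + (l.map g7).sum, t.2.2.2.2.2.2.2.1 + (l.map g8).sum, t.2.2.2.2.2.2.2.2.1 + (l.map g9).sum, t.2.2.2.2.2.2.2.2.2.1 + (l.map g10).sum, t.2.2.2.2.2.2.2.2.2.2.1 + (l.map g11).sum, t.2.2.2.2.2.2.2.2.2.2.2.1 + (l.map g12).sum, t.2.2.2.2.2.2.2.2.2.2.2.2 + (l.map g13).sum) := by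
  induction l generalizing t with
  | nil => simp
  | cons x xs ih => simp [List.foldl, ih]; and_intros <;> ring

-- ===== VERDICT (by name: the statement is the Claim_ definition above) =====
theorem get_past_seasons_spec : Claim_equal_get_past_seasons := by
  intro pid data psc _ _
  unfold Spec_get_past_seasons get_past_seasons get_past_seasons_alt
  rw [pvFoldA]
  simp [pvFields, pvSumKey]
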